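-- pv_equiv track=rewrite | github.com/nummy/exec | car/cable_car.py | get_longest_ride
-- ===== SOURCE A (Python) =====
-- def get_longest_ride(data):
-- 	"""
-- 	get the length of the longest good ride
-- 	"""
-- 	length = len(data)
-- 	start = 0
-- 	second = 1
-- 	step = data[second] - data[start]
-- 	res = {0:1}
-- 	for i in range(2, length):
-- 		if (data[i]-data[second]) == step:
-- 			res[start] =  res.get(start,1) + 1
-- 			second = i
-- 		else:
-- 			start = i-1
-- 			second = i
-- 			step = data[second]-data[start]
-- 			res[start] = 1
-- 	sorted_res = sorted(res.items(), key=lambda data:data[1], reverse=True)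
-- 	start = sorted_res[0][0]
-- 	count = sorted_res[0][1]
-- 	return start, count, data[start:count+start+1]
-- ===== SOURCE B (Python) =====
-- def get_longest_ride(data):
-- 	"""
-- 	get the length of the longest good ride
-- 	"""
-- 	best_start = 0
-- 	best_count = 1
-- 	run_start = 0
-- 	run_count = 1
-- 	prev_step = data[1] - data[0]
-- 	for i in range(2, len(data)):
-- 		step = data[i] - data[i - 1]
-- 		if step == prev_step:
-- 			run_count += 1
-- 		else:
-- 			run_start = i - 1
-- 			run_count = 1
-- 			prev_step = step
-- 		if run_count > best_count:
-- 			best_start = run_start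
-- 			best_count = run_count
-- 	return best_start, best_count, data[best_start:best_start + best_count + 1]
-- ===== Notes on version B (the rewrite author's own statement) =====
-- stated objective: faster
-- what changed: A builds a dict of run lengths and stable-sorts its items descending by count to pick the winner; B does one pass over the differences tracking the current run and keeping the first maximal run with a strict '>' comparison, so the dict and the sort disappear.
import Mathlib
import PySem

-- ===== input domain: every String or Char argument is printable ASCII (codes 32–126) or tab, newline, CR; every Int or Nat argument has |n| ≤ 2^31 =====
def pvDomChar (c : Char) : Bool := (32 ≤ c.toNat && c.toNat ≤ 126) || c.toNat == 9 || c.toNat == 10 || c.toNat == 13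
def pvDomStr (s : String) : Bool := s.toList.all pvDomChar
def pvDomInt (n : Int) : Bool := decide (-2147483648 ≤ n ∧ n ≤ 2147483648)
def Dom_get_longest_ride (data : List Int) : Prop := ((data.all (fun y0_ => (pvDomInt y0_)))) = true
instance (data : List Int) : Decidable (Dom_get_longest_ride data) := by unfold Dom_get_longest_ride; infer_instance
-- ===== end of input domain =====

-- B replaces A's dict + stable descending sort with a single pass that tracks the
-- current equal-step run and keeps the first run of maximal length (strict '>').

-- ===== PORT A =====
def pvAStep (data : List Int) (st : Int × Int × Int × PySem.Dict Int Int) (i : Int) :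
    Int × Int × Int × PySem.Dict Int Int :=
  match st with
  | (start, second, step, res) =>
    if PySem.List.pyGetD data i 0 - PySem.List.pyGetD data second 0 = step then
      (start, i, step, res.insert start (res.getD start 1 + 1))
    else
      (i - 1, i, PySem.List.pyGetD data i 0 - PySem.List.pyGetD data (i - 1) 0,
        res.insert (i - 1) 1)

def get_longest_ride (data : List Int) : Int × Int × List Int :=
  let length := PySem.List.len data
  let st0 : Int × Int × Int × PySem.Dict Int Int :=
    (0, 1, PySem.List.pyGetD data 1 0 - PySem.List.pyGetD data 0 0, PySem.Dict.ofList [(0, 1)])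
  let st := (PySem.List.pyRange 2 length).foldl (pvAStep data) st0
  let sorted_res := PySem.List.sorted st.2.2.2.items (fun p => p.2) true
  let top := PySem.List.pyGetD sorted_res 0 (0, 0)
  (top.1, top.2, PySem.List.slice data (some top.1) (some (top.2 + top.1 + 1)))

-- ===== PORT B =====
def pvBStep (data : List Int) (st : Int × Int × Int × Int × Int) (i : Int) :
    Int × Int × Int × Int × Int :=
  match st with
  | (bs, bc, rs, rc, ps) =>
    let step := PySem.List.pyGetD data i 0 - PySem.List.pyGetD data (i - 1) 0
    let (rs', rc', ps') := if step = ps then (rs, rc + 1, ps) else (i - 1, 1, step)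
    if rc' > bc then (rs', rc', rs', rc', ps') else (bs, bc, rs', rc', ps')

def get_longest_ride_alt (data : List Int) : Int × Int × List Int :=
  let st0 : Int × Int × Int × Int × Int :=
    (0, 1, 0, 1, PySem.List.pyGetD data 1 0 - PySem.List.pyGetD data 0 0)
  let st := (PySem.List.pyRange 2 (PySem.List.len data)).foldl (pvBStep data) st0
  (st.1, st.2.1, PySem.List.slice data (some st.1) (some (st.1 + st.2.1 + 1)))

-- ===== PRECONDITION & SPEC =====
-- Pre_ excludes only lists of fewer than two elements, on which A raises IndexError (data[1]); B raises there too.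
def Pre_get_longest_ride (data : List Int) : Prop := 2 ≤ data.length
instance (data : List Int) : Decidable (Pre_get_longest_ride data) := by
  unfold Pre_get_longest_ride; infer_instance

def pvWitness_get_longest_ride : List Int := [0, 1, 2, 7]

def Spec_get_longest_ride (data : List Int) (out : Int × Int × List Int) : Prop :=
  out = get_longest_ride_alt data
instance (data : List Int) (out : Int × Int × List Int) : Decidable (Spec_get_longest_ride data out) := by
  unfold Spec_get_longest_ride; infer_instance

-- ===== CLAIM (what is proved, stated in full; the proofs are below) =====
def Claim_equal_get_longest_ride : Prop := ∀ (data : List Int), Dom_get_longest_ride data →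
  Pre_get_longest_ride data → Spec_get_longest_ride data (get_longest_ride data)

-- ===== LEMMAS AND PROOFS =====

-- first-maximum fold over (start, count) pairs: strict '<' keeps the earlier pair on ties
def pvFstep (b q : Int × Int) : Int × Int := if b.2 < q.2 then q else b

def pvFmax? : List (Int × Int) → Option (Int × Int)
  | [] => none
  | h :: t => some (t.foldl pvFstep h)

lemma pvFmax?_append (l : List (Int × Int)) (q : Int × Int) :
    pvFmax? (l ++ [q]) = some (match pvFmax? l with | none => q | some b => pvFstep b q) := by
  cases l with
  | nil => rfl
  | cons h t => simp [pvFmax?, List.foldl_append]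

lemma pvFstep_absorb (b : Int × Int) (s c : Int) :
    pvFstep (pvFstep b (s, c)) (s, c + 1) = pvFstep b (s, c + 1) := by
  by_cases h1 : b.2 < c
  · simp [pvFstep, h1, show (c : Int) < c + 1 by omega, show b.2 < c + 1 by omega]
  · by_cases h2 : b.2 < c + 1 <;> simp [pvFstep, h1, h2]

lemma pvInsertBy_cons (before : Int × Int → Int × Int → Bool) (x y : Int × Int)
    (ys : List (Int × Int)) :
    PySem.List.insertBy before x (y :: ys) =
      if before x y then x :: y :: ys else y :: PySem.List.insertBy before x ys := rfl

lemma pvHead_foldl_insertBy (l : List (Int × Int)) :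
    ∀ (y : Int × Int) (ys : List (Int × Int)),
    ((l.foldl (fun acc x =>
        PySem.List.insertBy (fun a b => decide ((b.2 : Int) < a.2)) x acc) (y :: ys)).head?)
      = some (l.foldl pvFstep y) := by
  induction l with
  | nil => intro y ys; simp
  | cons q t ih =>
    intro y ys
    simp only [List.foldl_cons, pvInsertBy_cons]
    by_cases hlt : y.2 < q.2
    · rw [if_pos (by simpa using hlt)]
      have h1 : pvFstep y q = q := by simp [pvFstep, hlt]
      rw [h1]
      exact ih q (y :: ys)
    · rw [if_neg (by simpa using hlt)]
      have h1 : pvFstep y q = y := by simp [pvFstep, hlt]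
      rw [h1]
      exact ih y _

-- head of Python's stable descending sort by value = first pair of maximal value
lemma pvHead_sorted_rev (l : List (Int × Int)) :
    (PySem.List.sorted l (fun p => p.2) true).head? = pvFmax? l := by
  rw [PySem.List.sorted_rev_eq_foldl_insertBy]
  cases l with
  | nil => rfl
  | cons h t =>
    simp only [List.foldl_cons]
    exact pvHead_foldl_insertBy t h []

-- sorted_res[0] of A's final dict = the first pair of maximal count
lemma pvTop (items : List (Int × Int)) (p : Int × Int) (h : pvFmax? items = some p) :
    PySem.List.pyGetD (PySem.List.sorted items (fun q => q.2) true) 0 (0, 0) = p := by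
  have hhead := pvHead_sorted_rev items
  rw [h] at hhead
  cases hsr : PySem.List.sorted items (fun q => q.2) true with
  | nil => rw [hsr] at hhead; simp at hhead
  | cons x t =>
    rw [hsr] at hhead
    simp only [List.head?_cons, Option.some.injEq] at hhead
    rw [PySem.List.pyGetD_zero_cons, hhead]

-- the loop invariant: A's state (start, second, step, res) vs B's state
-- (bs, bc, rs, rc, ps), i being the next index the loops will process
def pvInv (i : Int) (a : Int × Int × Int × PySem.Dict Int Int)
    (b : Int × Int × Int × Int × Int) : Prop :=
  a.2.1 = i - 1 ∧
  b.2.2.1 = a.1 ∧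
  b.2.2.2.2 = a.2.2.1 ∧
  a.1 ≤ i - 2 ∧
  a.2.2.2.keys.Nodup ∧
  (∃ L, a.2.2.2.items = L ++ [(a.1, b.2.2.2.1)] ∧ ∀ p ∈ L, p.1 < a.1) ∧
  pvFmax? a.2.2.2.items = some (b.1, b.2.1)

lemma pvInv_step (data : List Int) (i : Int) (a : Int × Int × Int × PySem.Dict Int Int)
    (b : Int × Int × Int × Int × Int) (h : pvInv i a b) :
    pvInv (i + 1) (pvAStep data a i) (pvBStep data b i) := by
  obtain ⟨s, sec, stp, res⟩ := a
  obtain ⟨bs, bc, rs, rc, ps⟩ := b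
  obtain ⟨h1, h2, h3, h4, h5, ⟨L, hL, hLlt⟩, h7⟩ := h
  simp only at h1 h2 h3 h4 h5 hL hLlt h7
  subst h1 h2 h3
  have hkeys : res.keys = L.map (fun x => x.1) ++ [rs] := by
    simp only [PySem.Dict.keys, hL, List.map_append, List.map_cons, List.map_nil]
  simp only [pvAStep, pvBStep]
  by_cases hc : PySem.List.pyGetD data i 0 - PySem.List.pyGetD data (i - 1) 0 = ps
  · -- step matches: the current run grows
    rw [if_pos hc, if_pos hc]
    have hmem : (rs, rc) ∈ res.items := by rw [hL]; simp
    have hgetD : res.getD rs 1 = rc := PySem.Dict.getD_of_mem_items res hmem h5 1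
    have hcont : res.contains rs = true := by
      rw [PySem.Dict.contains_eq_decide_mem_keys, hkeys]; simp
    have hitems' : (res.insert rs (rc + 1)).items = L ++ [(rs, rc + 1)] := by
      rw [PySem.Dict.items_insert_of_contains res (rc + 1) hcont, hL, List.map_append]
      have hmapL : List.map (fun p => if (p.1 == rs) = true then (rs, rc + 1) else p) L
          = List.map id L := by
        refine List.map_congr_left ?_
        intro p hp
        have := hLlt p hp
        simp [show ¬ (p.1 = rs) by omega]
      rw [hmapL, List.map_id]
      simp
    have hkeys' : (res.insert rs (rc + 1)).keys = res.keys := by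
      simp only [PySem.Dict.keys, hitems', hL, List.map_append, List.map_cons, List.map_nil]
    have hnew : pvFmax? (L ++ [(rs, rc + 1)]) =
        some (if rc + 1 > bc then (rs, rc + 1) else (bs, bc)) := by
      rw [pvFmax?_append]
      rw [hL, pvFmax?_append] at h7
      cases hfL : pvFmax? L with
      | none =>
        rw [hfL] at h7
        simp only [Option.some.injEq, Prod.mk.injEq] at h7
        obtain ⟨hbs, hbc⟩ := h7
        show some (rs, rc + 1) = some (if rc + 1 > bc then (rs, rc + 1) else (bs, bc))
        rw [if_pos (by omega : bc < rc + 1)]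
      | some b0 =>
        rw [hfL] at h7
        have hb0 : pvFstep b0 (rs, rc) = (bs, bc) := Option.some.inj h7
        have habs := pvFstep_absorb b0 rs rc
        rw [hb0] at habs
        show some (pvFstep b0 (rs, rc + 1)) = some (if rc + 1 > bc then (rs, rc + 1) else (bs, bc))
        rw [← habs]
        by_cases hcc : bc < rc + 1
        · rw [show pvFstep (bs, bc) (rs, rc + 1) = (rs, rc + 1) from by simp [pvFstep, hcc],
            if_pos hcc]
        · rw [show pvFstep (bs, bc) (rs, rc + 1) = (bs, bc) from by simp [pvFstep, hcc],
            if_neg hcc]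
    rw [hgetD]
    show pvInv (i + 1) (rs, i, ps, res.insert rs (rc + 1))
      (if rc + 1 > bc then (rs, rc + 1, rs, rc + 1, ps) else (bs, bc, rs, rc + 1, ps))
    by_cases hb : rc + 1 > bc
    · rw [if_pos hb]
      refine ⟨by show i = i + 1 - 1; omega, rfl, rfl, by show rs ≤ i + 1 - 2; omega, ?_, ?_, ?_⟩
      · show (res.insert rs (rc + 1)).keys.Nodup
        rw [hkeys']
        exact h5
      · exact ⟨L, by show (res.insert rs (rc + 1)).items = L ++ [(rs, rc + 1)]; rw [hitems'], hLlt⟩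
      · show pvFmax? (res.insert rs (rc + 1)).items = some (rs, rc + 1)
        rw [hitems', hnew, if_pos hb]
    · rw [if_neg hb]
      refine ⟨by show i = i + 1 - 1; omega, rfl, rfl, by show rs ≤ i + 1 - 2; omega, ?_, ?_, ?_⟩
      · show (res.insert rs (rc + 1)).keys.Nodup
        rw [hkeys']
        exact h5
      · exact ⟨L, by show (res.insert rs (rc + 1)).items = L ++ [(rs, rc + 1)]; rw [hitems'], hLlt⟩
      · show pvFmax? (res.insert rs (rc + 1)).items = some (bs, bc)
        rw [hitems', hnew, if_neg hb]
  · -- step differs: a fresh run starts at i - 1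
    rw [if_neg hc, if_neg hc]
    have hnotmem : (i - 1) ∉ res.keys := by
      rw [hkeys]
      simp only [List.mem_append, List.mem_map, List.mem_singleton, not_or]
      refine ⟨?_, by omega⟩
      rintro ⟨p, hp, hps⟩
      have := hLlt p hp
      omega
    have hcont : res.contains (i - 1) = false := by
      rw [PySem.Dict.contains_eq_decide_mem_keys]
      simpa using hnotmem
    have hitems' : (res.insert (i - 1) 1).items = res.items ++ [(i - 1, 1)] :=
      PySem.Dict.items_insert_of_not_contains res 1 hcont
    have hkeys' : (res.insert (i - 1) 1).keys = res.keys ++ [i - 1] := by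
      simp only [PySem.Dict.keys, hitems', List.map_append, List.map_cons, List.map_nil]
    have hnodup' : (res.insert (i - 1) 1).keys.Nodup := by
      rw [hkeys', List.nodup_append]
      refine ⟨h5, List.nodup_singleton _, ?_⟩
      intro x hx y hy
      have hy2 : y = i - 1 := by simpa using hy
      subst hy2
      exact fun heq => hnotmem (heq ▸ hx)
    have hLnew : ∀ p ∈ L ++ [(rs, rc)], p.1 < i - 1 := by
      intro p hp
      rcases List.mem_append.mp hp with hp | hp
      · have := hLlt p hp; omega
      · simp only [List.mem_singleton] at hp
        subst hp
        show rs < i - 1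
        omega
    have hnew : pvFmax? (res.items ++ [(i - 1, 1)]) =
        some (if (1 : Int) > bc then (i - 1, 1) else (bs, bc)) := by
      rw [pvFmax?_append, h7]
      show some (pvFstep (bs, bc) (i - 1, 1)) = some (if (1 : Int) > bc then (i - 1, 1) else (bs, bc))
      by_cases hcc : bc < 1
      · rw [show pvFstep (bs, bc) (i - 1, 1) = (i - 1, 1) from by simp [pvFstep, hcc], if_pos hcc]
      · rw [show pvFstep (bs, bc) (i - 1, 1) = (bs, bc) from by simp [pvFstep, hcc], if_neg hcc]
    show pvInv (i + 1)
      (i - 1, i, PySem.List.pyGetD data i 0 - PySem.List.pyGetD data (i - 1) 0,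
        res.insert (i - 1) 1)
      (if (1 : Int) > bc then
        (i - 1, 1, i - 1, 1, PySem.List.pyGetD data i 0 - PySem.List.pyGetD data (i - 1) 0)
      else (bs, bc, i - 1, 1, PySem.List.pyGetD data i 0 - PySem.List.pyGetD data (i - 1) 0))
    by_cases hb : (1 : Int) > bc
    · rw [if_pos hb]
      refine ⟨by show i = i + 1 - 1; omega, rfl, rfl, by show i - 1 ≤ i + 1 - 2; omega,
        hnodup', ?_, ?_⟩
      · exact ⟨L ++ [(rs, rc)],
          by show (res.insert (i - 1) 1).items = (L ++ [(rs, rc)]) ++ [(i - 1, 1)]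
             rw [hitems', hL], hLnew⟩
      · show pvFmax? (res.insert (i - 1) 1).items = some (i - 1, 1)
        rw [hitems', hnew, if_pos hb]
    · rw [if_neg hb]
      refine ⟨by show i = i + 1 - 1; omega, rfl, rfl, by show i - 1 ≤ i + 1 - 2; omega,
        hnodup', ?_, ?_⟩
      · exact ⟨L ++ [(rs, rc)],
          by show (res.insert (i - 1) 1).items = (L ++ [(rs, rc)]) ++ [(i - 1, 1)]
             rw [hitems', hL], hLnew⟩
      · show pvFmax? (res.insert (i - 1) 1).items = some (bs, bc)
        rw [hitems', hnew, if_neg hb]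

lemma pvInv_init (e : Int) :
    pvInv 2 (0, 1, e, PySem.Dict.ofList [(0, 1)]) (0, 1, 0, 1, e) := by
  unfold pvInv
  refine ⟨by norm_num, by norm_num, by norm_num, by norm_num, ?_, ⟨[], ?_, by simp⟩, ?_⟩
  · show (PySem.Dict.ofList [((0 : Int), (1 : Int))]).keys.Nodup
    decide
  · show (PySem.Dict.ofList [((0 : Int), (1 : Int))]).items = [] ++ [((0 : Int), (1 : Int))]
    decide
  · show pvFmax? (PySem.Dict.ofList [((0 : Int), (1 : Int))]).items = some (0, 1)
    decide

lemma pvLoop (data : List Int) (n : Nat) :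
    pvInv (2 + (n : Int))
      ((PySem.List.pyRange 2 (2 + (n : Int))).foldl (pvAStep data)
        (0, 1, PySem.List.pyGetD data 1 0 - PySem.List.pyGetD data 0 0, PySem.Dict.ofList [(0, 1)]))
      ((PySem.List.pyRange 2 (2 + (n : Int))).foldl (pvBStep data)
        (0, 1, 0, 1, PySem.List.pyGetD data 1 0 - PySem.List.pyGetD data 0 0)) := by
  induction n with
  | zero =>
    simp only [Nat.cast_zero, add_zero]
    have h0 : PySem.List.pyRange 2 2 = ([] : List Int) := by decide
    rw [h0]
    simp only [List.foldl_nil]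
    exact pvInv_init _
  | succ k ih =>
    have hcast : (2 + ((k + 1 : Nat) : Int)) = (2 + (k : Int)) + 1 := by push_cast; ring
    rw [hcast, PySem.List.pyRange_one_succ_right (by omega), List.foldl_append, List.foldl_append]
    simp only [List.foldl_cons, List.foldl_nil]
    exact pvInv_step data (2 + (k : Int)) _ _ ih

-- ===== VERDICT (by name: the statement is the Claim_ definition above) =====
theorem get_longest_ride_spec : Claim_equal_get_longest_ride := by
  intro data hdom hpre
  unfold Pre_get_longest_ride at hpre
  unfold Spec_get_longest_ride
  obtain ⟨n, hn⟩ : ∃ n : Nat, data.length = n + 2 := ⟨data.length - 2, by omega⟩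
  have hlen : PySem.List.len data = 2 + (n : Int) := by
    rw [PySem.List.len_eq, hn]; push_cast; ring
  have h7 := (pvLoop data n).2.2.2.2.2.2
  simp only [get_longest_ride, get_longest_ride_alt, hlen]
  rw [pvTop _ _ h7]
  simp only [Prod.mk.injEq]
  refine ⟨by trivial, by trivial, ?_⟩
  have hcomm : ((PySem.List.pyRange 2 (2 + (n : Int))).foldl (pvBStep data)
        (0, 1, 0, 1, PySem.List.pyGetD data 1 0 - PySem.List.pyGetD data 0 0)).2.1 +
      ((PySem.List.pyRange 2 (2 + (n : Int))).foldl (pvBStep data)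
        (0, 1, 0, 1, PySem.List.pyGetD data 1 0 - PySem.List.pyGetD data 0 0)).1 + 1 =
      ((PySem.List.pyRange 2 (2 + (n : Int))).foldl (pvBStep data)
        (0, 1, 0, 1, PySem.List.pyGetD data 1 0 - PySem.List.pyGetD data 0 0)).1 +
      ((PySem.List.pyRange 2 (2 + (n : Int))).foldl (pvBStep data)
        (0, 1, 0, 1, PySem.List.pyGetD data 1 0 - PySem.List.pyGetD data 0 0)).2.1 + 1 := by
    ring
  rw [hcomm]
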